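-- pv_equiv track=rewrite | github.com/Samfundet/Samfundet4 | backend/samfundet/utils/generate_optimal_interview_timeblocks.py | availability_count
-- ===== SOURCE A (Python) =====
-- def availability_count(unavailability, merged_intervals):
--     available_persons_count = {}
--     for date, time_points in merged_intervals.items():
--         count_blocks = []
--         for i in range(len(time_points) - 1):
--             start = time_points[i]
--             end = time_points[i + 1]
--             count = 0
--             for interviewer, dates in unavailability.items():
--                 if date in dates:
--                     available = True
--                     for unav_start, unav_end in dates[date]:
--                         if unav_start < end and unav_end > start:
--                             available = False
--                             break
--                     if available:
--                         count += 1
--                 else: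
--                     count += 1  # Available all day if no unavailability for that day
--             count_blocks.append((start, end, count))
--         available_persons_count[date] = count_blocks
--     return available_persons_count
-- ===== SOURCE B (Python) =====
-- def availability_count(unavailability, merged_intervals):
--     total = len(unavailability)
--     result = {}
--     for date, time_points in merged_intervals.items():
--         blocks = list(zip(time_points, time_points[1:]))
--         counts = [total] * len(blocks)
--         for dates in unavailability.values():
--             intervals = dates.get(date)
--             if intervals is not None:
--                 counts = [c - 1 if any(us < e and ue > s for us, ue in intervals) else c
--                           for c, (s, e) in zip(counts, blocks)]
--         result[date] = [(s, e, c) for (s, e), c in zip(blocks, counts)]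
--     return result
-- ===== Notes on version B (the rewrite author's own statement) =====
-- stated objective: alternative
-- what changed: A recomputes, for every time block, a full scan over all interviewers with a per-block dict-membership test and an early-exit interval check; B inverts the loop nest: it starts every block of a date at the total interviewer count and, once per interviewer that has entries for that date, decrements the blocks that interviewer's intervals overlap, so interviewers without data for the date are never touched per block.
import Mathlib
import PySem

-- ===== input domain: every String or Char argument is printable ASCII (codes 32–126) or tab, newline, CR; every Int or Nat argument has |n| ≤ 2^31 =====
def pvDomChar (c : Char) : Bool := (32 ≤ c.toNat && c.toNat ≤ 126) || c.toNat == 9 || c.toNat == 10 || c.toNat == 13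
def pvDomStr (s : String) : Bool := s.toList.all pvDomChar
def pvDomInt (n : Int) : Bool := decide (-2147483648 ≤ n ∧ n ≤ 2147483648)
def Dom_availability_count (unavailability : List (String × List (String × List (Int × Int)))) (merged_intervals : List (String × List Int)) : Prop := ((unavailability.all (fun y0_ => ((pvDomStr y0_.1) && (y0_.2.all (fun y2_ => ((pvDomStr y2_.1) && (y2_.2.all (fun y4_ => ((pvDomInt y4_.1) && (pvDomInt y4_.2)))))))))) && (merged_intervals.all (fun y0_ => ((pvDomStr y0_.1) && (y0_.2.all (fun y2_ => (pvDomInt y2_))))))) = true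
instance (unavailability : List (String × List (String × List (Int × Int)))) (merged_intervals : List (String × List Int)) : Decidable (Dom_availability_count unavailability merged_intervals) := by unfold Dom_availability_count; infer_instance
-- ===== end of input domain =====

-- B inverts A's loop nest: instead of re-scanning every interviewer for every time block, it starts every
-- block at the total interviewer count and decrements, per interviewer unavailable on the date, the blocks
-- that interviewer's intervals overlap (objective: alternative decomposition, same asymptotic cost).

-- ===== PORT A =====
-- A's innermost loop with `break`, returning the `available` flag.
def pvAvailLoop (ivs : List (Int × Int)) (start stop : Int) : Bool :=
  match ivs with
  | [] => true
  | (us, ue) :: rest => if us < stop && ue > start then false else pvAvailLoop rest start stop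

def availability_count (unavailability : List (String × List (String × List (Int × Int)))) (merged_intervals : List (String × List Int)) : List (String × List (Int × Int × Int)) :=
  -- the Python function receives dicts: build them from the association lists exactly as Python's
  -- dict construction does (duplicate keys: last value wins, first position kept)
  let unavD : PySem.Dict String (PySem.Dict String (List (Int × Int))) :=
    PySem.Dict.ofList (unavailability.map (fun p => (p.1, PySem.Dict.ofList p.2)))
  let miD : PySem.Dict String (List Int) := PySem.Dict.ofList merged_intervals
  let res : PySem.Dict String (List (Int × Int × Int)) :=
    miD.items.foldl (fun acc dp =>
      let date := dp.1
      let tps := dp.2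
      let count_blocks : List (Int × Int × Int) :=
        (PySem.List.pyRange 0 ((tps.length : Int) - 1) 1).foldl (fun cb i =>
          let start := PySem.List.pyGetD tps i 0          -- time_points[i]; i always in range here
          let stop := PySem.List.pyGetD tps (i + 1) 0     -- time_points[i + 1]; in range
          let count : Int :=
            unavD.items.foldl (fun c q =>
              if q.2.contains date then                   -- `if date in dates`
                match q.2.get? date with                  -- `dates[date]`; `some` under the guard
                | some ivs => if pvAvailLoop ivs start stop then c + 1 else c
                | none => c                               -- unreachable under the `contains` guard
              else c + 1) 0
          cb ++ [(start, stop, count)]) []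
      acc.insert date count_blocks) PySem.Dict.empty
  res.items

-- ===== PORT B =====
def pvAnyOverlap (ivs : List (Int × Int)) (s e : Int) : Bool :=
  ivs.any (fun p => p.1 < e && p.2 > s)

def availability_count_alt (unavailability : List (String × List (String × List (Int × Int)))) (merged_intervals : List (String × List Int)) : List (String × List (Int × Int × Int)) :=
  let unavD : PySem.Dict String (PySem.Dict String (List (Int × Int))) :=
    PySem.Dict.ofList (unavailability.map (fun p => (p.1, PySem.Dict.ofList p.2)))
  let miD : PySem.Dict String (List Int) := PySem.Dict.ofList merged_intervals
  let total : Int := (unavD.size : Int)                   -- len(unavailability)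
  let res : PySem.Dict String (List (Int × Int × Int)) :=
    miD.items.foldl (fun acc dp =>
      let date := dp.1
      let tps := dp.2
      let blocks := tps.zip (tps.drop 1)                  -- zip(time_points, time_points[1:])
      let counts : List Int :=
        unavD.values.foldl (fun counts dates =>
          match dates.get? date with                      -- dates.get(date)
          | none => counts
          | some ivs =>
              List.zipWith (fun c b => if pvAnyOverlap ivs b.1 b.2 then c - 1 else c) counts blocks)
          (List.replicate blocks.length total)
      acc.insert date (List.zipWith (fun b c => (b.1, b.2, c)) blocks counts)) PySem.Dict.empty
  res.items

-- ===== PRECONDITION & SPEC =====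
def Spec_availability_count (unavailability : List (String × List (String × List (Int × Int)))) (merged_intervals : List (String × List Int)) (out : List (String × List (Int × Int × Int))) : Prop := out = availability_count_alt unavailability merged_intervals
instance (unavailability : List (String × List (String × List (Int × Int)))) (merged_intervals : List (String × List Int)) (out : List (String × List (Int × Int × Int))) : Decidable (Spec_availability_count unavailability merged_intervals out) := by unfold Spec_availability_count; infer_instance

-- ===== CLAIM (what is proved, stated in full; the proofs are below) =====
def Claim_equal_availability_count : Prop := ∀ (unavailability : List (String × List (String × List (Int × Int)))) (merged_intervals : List (String × List Int)), Dom_availability_count unavailability merged_intervals → Spec_availability_count unavailability merged_intervals (availability_count unavailability merged_intervals)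

-- ===== LEMMAS AND PROOFS =====

-- whether interviewer data `dates` makes its owner unavailable in the block (s, e) on `date`
def pvBlocked (dates : PySem.Dict String (List (Int × Int))) (date : String) (s e : Int) : Bool :=
  match dates.get? date with
  | some ivs => pvAnyOverlap ivs s e
  | none => false

theorem pvAvailLoop_eq_not_any (ivs : List (Int × Int)) (s e : Int) :
    pvAvailLoop ivs s e = !pvAnyOverlap ivs s e := by
  induction ivs with
  | nil => rfl
  | cons hd tl ih =>
    obtain ⟨us, ue⟩ := hd
    simp only [pvAvailLoop, pvAnyOverlap, List.any_cons] at *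
    by_cases h : (us < e && ue > s) = true
    · simp [h]
    · simp only [if_neg h, ih]
      simp only [Bool.not_eq_true] at h
      simp [h]

-- A's inner interviewer loop counts `c + (number of interviewers) - (number blocked)`
theorem pvCountA (items : List (String × PySem.Dict String (List (Int × Int)))) (date : String)
    (s e : Int) (c : Int) :
    items.foldl (fun c q =>
      if q.2.contains date then
        match q.2.get? date with
        | some ivs => if pvAvailLoop ivs s e then c + 1 else c
        | none => c
      else c + 1) c
      = c + (items.length : Int) - (items.countP (fun q => pvBlocked q.2 date s e) : Int) := by
  induction items generalizing c with
  | nil => simp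
  | cons q rest ih =>
    simp only [List.foldl_cons, List.countP_cons, List.length_cons]
    rw [PySem.Dict.contains_eq_isSome_get?]
    cases hq : q.2.get? date with
    | none =>
      simp only [Option.isSome_none, Bool.false_eq_true, if_false]
      rw [ih]
      have hb : pvBlocked q.2 date s e = false := by simp [pvBlocked, hq]
      simp [hb]
      ring
    | some ivs =>
      simp only [Option.isSome_some, if_true]
      have hb : pvBlocked q.2 date s e = !pvAvailLoop ivs s e := by
        simp [pvBlocked, hq, pvAvailLoop_eq_not_any]
      by_cases hav : pvAvailLoop ivs s e = true
      · simp only [hav, if_true]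
        rw [ih]
        simp [hb, hav]
        ring
      · simp only [hav, Bool.false_eq_true, if_false]
        rw [ih]
        simp only [Bool.not_eq_true] at hav
        simp [hb, hav]
        ring

theorem pvZipWithMapLeftSelf {α β : Type} (g : β → α → β) (f : α → β) (l : List α) :
    List.zipWith g (l.map f) l = l.map (fun a => g (f a) a) := by
  induction l with
  | nil => rfl
  | cons x xs ih => simp [ih]

theorem pvZipWithMapRightSelf {α β γ : Type} (g : α → β → γ) (f : α → β) (l : List α) :
    List.zipWith g l (l.map f) = l.map (fun a => g a (f a)) := by
  induction l with
  | nil => rfl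
  | cons x xs ih => simp [ih]

-- B's decrement loop, characterised from any per-block starting values
theorem pvCountB (vals : List (PySem.Dict String (List (Int × Int)))) (date : String)
    (blocks : List (Int × Int)) (f : (Int × Int) → Int) :
    vals.foldl (fun counts dates =>
      match dates.get? date with
      | none => counts
      | some ivs =>
          List.zipWith (fun c b => if pvAnyOverlap ivs b.1 b.2 then c - 1 else c) counts blocks)
      (blocks.map f)
      = blocks.map (fun b => f b - (vals.countP (fun d => pvBlocked d date b.1 b.2) : Int)) := by
  induction vals generalizing f with
  | nil => simp
  | cons d rest ih =>
    simp only [List.foldl_cons]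
    cases hd : d.get? date with
    | none =>
      rw [ih]
      apply List.map_congr_left
      intro b _
      have hb : pvBlocked d date b.1 b.2 = false := by simp [pvBlocked, hd]
      simp [hb]
    | some ivs =>
      simp only [pvZipWithMapLeftSelf, ih]
      apply List.map_congr_left
      intro b _
      have hb : pvBlocked d date b.1 b.2 = pvAnyOverlap ivs b.1 b.2 := by simp [pvBlocked, hd]
      by_cases hov : pvAnyOverlap ivs b.1 b.2 = true
      · simp [hb, hov]
        ring
      · simp only [Bool.not_eq_true] at hov
        simp [hb, hov]

-- the blocks A indexes are exactly zip(time_points, time_points[1:])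
theorem pvBlocksEq (tps : List Int) :
    (List.range (tps.length - 1)).map (fun i => (tps.getD i 0, tps.getD (i + 1) 0))
      = tps.zip (tps.drop 1) := by
  apply List.ext_getElem
  · simp
  · intro i h1 h2
    simp only [List.length_map, List.length_range] at h1
    have hi1 : i < tps.length := by omega
    have hi2 : i + 1 < tps.length := by omega
    simp [List.getElem_zip, hi1, hi2]

-- the per-date block lists of the two ports agree, for every date and time-point list
theorem pvPerDate (U : PySem.Dict String (PySem.Dict String (List (Int × Int))))
    (date : String) (tps : List Int) :
    (PySem.List.pyRange 0 ((tps.length : Int) - 1) 1).foldl (fun cb i =>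
        cb ++ [(PySem.List.pyGetD tps i 0, PySem.List.pyGetD tps (i + 1) 0,
          U.items.foldl (fun c q =>
            if q.2.contains date then
              match q.2.get? date with
              | some ivs => if pvAvailLoop ivs (PySem.List.pyGetD tps i 0) (PySem.List.pyGetD tps (i + 1) 0) then c + 1 else c
              | none => c
            else c + 1) (0 : Int))]) []
      = List.zipWith (fun (b : Int × Int) c => (b.1, b.2, c)) (tps.zip (tps.drop 1))
          (U.values.foldl (fun counts dates =>
            match dates.get? date with
            | none => counts
            | some ivs =>
                List.zipWith (fun c b => if pvAnyOverlap ivs b.1 b.2 then c - 1 else c) counts (tps.zip (tps.drop 1)))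
            (List.replicate (tps.zip (tps.drop 1)).length ((U.size : Int)))) := by
  -- A side: a fold appending singletons over a range is a map
  rw [PySem.List.pyRange_one, List.foldl_map, PySem.List.foldl_append_singleton_eq_map]
  -- B side: the initial replicate is a constant map; characterise the decrement fold
  have hrep : List.replicate (tps.zip (tps.drop 1)).length ((U.size : Int))
      = (tps.zip (tps.drop 1)).map (fun _ => (U.size : Int)) := by
    simp
  rw [hrep, pvCountB, pvZipWithMapRightSelf]
  have hA : ∀ k : Nat,
      (fun (i : Int) => ((PySem.List.pyGetD tps i 0, PySem.List.pyGetD tps (i + 1) 0,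
          U.items.foldl (fun c q =>
            if q.2.contains date then
              match q.2.get? date with
              | some ivs => if pvAvailLoop ivs (PySem.List.pyGetD tps i 0) (PySem.List.pyGetD tps (i + 1) 0) then c + 1 else c
              | none => c
            else c + 1) (0 : Int)) : Int × Int × Int)) ((0 : Int) + (k : Int))
        = (tps.getD k 0, tps.getD (k + 1) 0,
            (U.size : Int) - (U.items.countP (fun q => pvBlocked q.2 date (tps.getD k 0) (tps.getD (k + 1) 0)) : Int)) := by
    intro k
    have h1 : (0 : Int) + (k : Int) = ((k : Nat) : Int) := by ring
    have h2 : (k : Int) + 1 = (((k + 1 : Nat)) : Int) := by push_cast; ring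
    simp only [h1, h2, PySem.List.pyGetD_natCast, pvCountA]
    simp [PySem.Dict.size]
  rw [List.map_congr_left (fun k _ => hA k)]
  have hrange : ((tps.length : Int) - 1 - 0).toNat = tps.length - 1 := by omega
  rw [hrange]
  have hcomp : (List.range (tps.length - 1)).map (fun k =>
      ((tps.getD k 0, tps.getD (k + 1) 0,
        (U.size : Int) - (U.items.countP (fun q => pvBlocked q.2 date (tps.getD k 0) (tps.getD (k + 1) 0)) : Int)) : Int × Int × Int))
      = ((List.range (tps.length - 1)).map (fun i => (tps.getD i 0, tps.getD (i + 1) 0))).map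
          (fun b => (b.1, b.2, (U.size : Int) - (U.items.countP (fun q => pvBlocked q.2 date b.1 b.2) : Int))) := by
    rw [List.map_map]
    rfl
  rw [hcomp, pvBlocksEq]
  apply List.map_congr_left
  intro b _
  simp only [PySem.Dict.values, List.countP_map]
  rfl

-- a fold of fresh-key inserts from the empty dict lists its items in input order
theorem pvFoldInsertItems {α ν : Type} (ps : List (String × α)) (v : String × α → ν)
    (h : (ps.map Prod.fst).Nodup) :
    (ps.foldl (fun acc dp => acc.insert dp.1 (v dp)) (PySem.Dict.empty : PySem.Dict String ν)).items
      = ps.map (fun dp => (dp.1, v dp)) := by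
  rw [PySem.Dict.items_foldl_insert_fresh ps Prod.fst v PySem.Dict.empty
    (fun a _ => PySem.Dict.contains_empty _) h]
  rfl

theorem availability_count_eq_alt (unavailability : List (String × List (String × List (Int × Int))))
    (merged_intervals : List (String × List Int)) :
    availability_count unavailability merged_intervals
      = availability_count_alt unavailability merged_intervals := by
  have hnd : ((PySem.Dict.ofList merged_intervals).items.map Prod.fst).Nodup :=
    PySem.Dict.nodup_keys_ofList merged_intervals
  simp only [availability_count, availability_count_alt]
  rw [pvFoldInsertItems _ _ hnd, pvFoldInsertItems _ _ hnd]
  apply List.map_congr_left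
  intro dp _
  exact congrArg (fun l => (dp.1, l)) (pvPerDate _ dp.1 dp.2)

-- ===== VERDICT (by name: the statement is the Claim_ definition above) =====
theorem availability_count_spec : Claim_equal_availability_count := by
  intro unavailability merged_intervals _
  unfold Spec_availability_count
  exact availability_count_eq_alt unavailability merged_intervals
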